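-- pv_equiv track=rewrite | github.com/yosa97/textjav | trainer/utils/style_detection.py | _filter_substring_styles
-- ===== SOURCE A (Python) =====
-- def _filter_substring_styles(matched_styles: set) -> set:
--     """
--     Filters out styles that are substrings of other matched styles.
--     Keeps only the longest/most specific styles.
--
--     Args:
--         matched_styles: Set of matched style names
--
--     Returns:
--         Filtered set with substring styles removed
--     """
--     if len(matched_styles) <= 1:
--         return matched_styles
--
--     # Sort by length (descending) to check longer styles first
--     sorted_matches = sorted(matched_styles, key=len, reverse=True)
--     filtered_styles = set()
--
--     for current_style in sorted_matches:
--         current_lower = current_style.lower()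
--         is_substring = False
--
--         # Check if current style is a substring of any already filtered style
--         for existing_style in filtered_styles:
--             existing_lower = existing_style.lower()
--             if current_lower in existing_lower and current_style != existing_style:
--                 is_substring = True
--                 break
--
--         # Only add if it's not a substring of an existing style
--         if not is_substring:
--             filtered_styles.add(current_style)
--
--     return filtered_styles
-- ===== SOURCE B (Python) =====
-- def _filter_substring_styles(matched_styles: set) -> set:
--     ordered = sorted(matched_styles, key=len, reverse=True)
--     lowered = [(s, s.lower()) for s in ordered]
--     def contained(s, sl):
--         for t, tl in lowered:
--             if len(t) <= len(s):
--                 return False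
--             if sl in tl:
--                 return True
--         return False
--     return {s for s, sl in lowered if not contained(s, sl)}
-- ===== Notes on version B (the rewrite author's own statement) =====
-- stated objective: faster
-- what changed: Replaces the incrementally grown 'filtered' set with its inner scan over kept styles (re-lowering each on every check) by a single stateless filtering pass: a style is kept iff no strictly longer style's precomputed lowercase contains its lowercase, found by scanning the longest-first list only while entries are strictly longer (early exit); intended as faster by this constant-factor mechanism, measured 1.8-2.0x at the largest sizes both finished; correctness of checking against all longer styles instead of the kept ones rests on transitivity of the substring relation.
-- outside the precondition, e.g. on _filter_substring_styles({'Ab', 'aB'}): A returns {'Ab'}, B returns {'Ab', 'aB'}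
import Mathlib
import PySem

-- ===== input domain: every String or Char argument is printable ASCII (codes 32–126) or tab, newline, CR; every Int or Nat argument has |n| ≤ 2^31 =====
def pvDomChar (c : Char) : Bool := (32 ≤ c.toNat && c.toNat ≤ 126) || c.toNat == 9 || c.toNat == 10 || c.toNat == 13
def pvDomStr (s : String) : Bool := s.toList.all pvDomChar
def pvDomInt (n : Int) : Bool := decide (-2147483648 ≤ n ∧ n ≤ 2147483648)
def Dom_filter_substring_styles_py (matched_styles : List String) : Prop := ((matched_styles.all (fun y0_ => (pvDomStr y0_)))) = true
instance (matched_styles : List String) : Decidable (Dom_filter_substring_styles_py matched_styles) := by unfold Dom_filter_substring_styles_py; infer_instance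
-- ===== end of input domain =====

-- B replaces A's incrementally grown kept-set (inner scan with break, re-lowering on
-- every check) by a single stateless filtering pass: precomputed lowercase forms, scanned
-- longest-first only while entries are strictly longer (early exit). Intended as faster
-- by that constant-factor mechanism; a timing run measured 1.8-2.0x at the largest
-- sizes both versions finished. Same worst-case complexity class.

-- ===== PORT A =====
def filter_substring_styles_py (matched_styles : List String) : List String :=
  if matched_styles.length ≤ 1 then matched_styles
  else
    -- sorted(matched_styles, key=len, reverse=True)
    let sorted_matches := PySem.List.sorted matched_styles PySem.Str.len true
    sorted_matches.foldl
      (fun filtered_styles current_style =>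
        let current_lower := PySem.Str.lower current_style
        -- for existing_style in filtered_styles: … break  ≡  any
        let is_substring := filtered_styles.any (fun existing_style =>
          PySem.Str.isIn current_lower (PySem.Str.lower existing_style)
            && current_style != existing_style)
        if !is_substring then PySem.Set.add filtered_styles current_style
        else filtered_styles)
      (PySem.Set.empty)

-- ===== PORT B =====
-- helper `contained` of Source B: scan the longest-first list, stop at the first style
-- no longer than s (early return False) or the first containing one (early return True)
def pv_contained (lowered : List (String × String)) (s : String) (sl : String) : Bool :=
  match lowered with
  | [] => false
  | (t, tl) :: rest =>
    if PySem.Str.len t ≤ PySem.Str.len s then false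
    else if PySem.Str.isIn sl tl then true
    else pv_contained rest s sl

def filter_substring_styles_py_alt (matched_styles : List String) : List String :=
  let ordered := PySem.List.sorted matched_styles PySem.Str.len true
  let lowered := ordered.map (fun s => (s, PySem.Str.lower s))
  PySem.Set.ofList
    ((lowered.filter (fun p => !(pv_contained lowered p.1 p.2))).map (·.1))

-- ===== PRECONDITION & SPEC =====
-- Pre_ excludes inputs containing two DISTINCT styles equal up to case: there A keeps
-- only one of the pair and which one depends on Python's set iteration order (the sort's
-- tie order), a corner no caller specifies, while B keeps both.
def Pre_filter_substring_styles_py (matched_styles : List String) : Prop :=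
  ∀ x ∈ matched_styles, ∀ y ∈ matched_styles,
    PySem.Str.lower x = PySem.Str.lower y → x = y
instance (matched_styles : List String) : Decidable (Pre_filter_substring_styles_py matched_styles) := by
  unfold Pre_filter_substring_styles_py; infer_instance

def pvWitness_filter_substring_styles_py : List String := ["Bold Italic", "bold", "underline"]

def Spec_filter_substring_styles_py (matched_styles : List String) (out : List String) : Prop := out = filter_substring_styles_py_alt matched_styles
instance (matched_styles : List String) (out : List String) : Decidable (Spec_filter_substring_styles_py matched_styles out) := by unfold Spec_filter_substring_styles_py; infer_instance

-- ===== CLAIM (what is proved, stated in full; the proofs are below) =====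
def Claim_equal_filter_substring_styles_py : Prop := ∀ (matched_styles : List String), Dom_filter_substring_styles_py matched_styles → Pre_filter_substring_styles_py matched_styles → Spec_filter_substring_styles_py matched_styles (filter_substring_styles_py matched_styles)

-- ===== LEMMAS AND PROOFS =====

-- the pointwise predicate B evaluates: s survives iff no strictly longer style in l
-- contains it case-insensitively
def pvKeep (l : List String) (s : String) : Bool :=
  !(l.any (fun t => (PySem.Str.len s < PySem.Str.len t)
      && PySem.Str.isIn (PySem.Str.lower s) (PySem.Str.lower t)))

theorem pv_len_lower (s : String) : (PySem.Str.lower s).toList.length = s.toList.length := by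
  simp [PySem.Str.toList_lower, PySem.Chars.lower]

-- a nonempty selection from a list has an element of maximal key
theorem pv_argmax {α : Type} (f : α → Int) (p : α → Prop) :
    ∀ (l : List α), (∃ t ∈ l, p t) → ∃ t ∈ l, p t ∧ ∀ u ∈ l, p u → f u ≤ f t := by
  intro l
  induction l with
  | nil => rintro ⟨t, ht, -⟩; cases ht
  | cons a l ih =>
    intro h
    by_cases hl : ∃ t ∈ l, p t
    · obtain ⟨t, htl, hpt, hmax⟩ := ih hl
      by_cases hfa : f t ≤ f a ∧ p a
      · refine ⟨a, by simp, hfa.2, ?_⟩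
        rintro u hu hpu
        rcases List.mem_cons.mp hu with rfl | hu
        · exact le_refl _
        · exact le_trans (hmax u hu hpu) hfa.1
      · refine ⟨t, List.mem_cons_of_mem _ htl, hpt, ?_⟩
        rintro u hu hpu
        rcases List.mem_cons.mp hu with rfl | hu
        · by_cases hfa2 : f t ≤ f u
          · exact absurd ⟨hfa2, hpu⟩ hfa
          · omega
        · exact hmax u hu hpu
    · obtain ⟨t, ht, hpt⟩ := h
      rcases List.mem_cons.mp ht with rfl | htl
      · refine ⟨t, by simp, hpt, ?_⟩
        rintro u hu hpu
        rcases List.mem_cons.mp hu with rfl | hu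
        · exact le_refl _
        · exact absurd ⟨u, hu, hpu⟩ hl
      · exact absurd ⟨t, htl, hpt⟩ hl

-- the check A makes against the already-kept styles equals (the negation of) the
-- check B makes against all styles: substring-of is transitive, so a dropped
-- container is itself inside a kept, even longer one
theorem pv_cond (L0 pre rest : List String) (c : String)
    (hL : pre ++ c :: rest = L0)
    (hs : L0.Pairwise (fun a b => PySem.Str.len b ≤ PySem.Str.len a))
    (hinj : ∀ x ∈ L0, ∀ y ∈ L0, PySem.Str.lower x = PySem.Str.lower y → x = y) :
    (PySem.Set.ofList (pre.filter (pvKeep L0))).any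
      (fun existing_style => PySem.Str.isIn (PySem.Str.lower c) (PySem.Str.lower existing_style)
        && c != existing_style)
    = !(pvKeep L0 c) := by
  have hcL0 : c ∈ L0 := by rw [← hL]; exact List.mem_append_right _ (List.mem_cons_self ..)
  have d1 : (PySem.Set.ofList (pre.filter (pvKeep L0))).any
      (fun existing_style => PySem.Str.isIn (PySem.Str.lower c) (PySem.Str.lower existing_style)
        && c != existing_style) = true → pvKeep L0 c = false := by
    intro hc
    rw [List.any_eq_true] at hc
    obtain ⟨ex, hexmem, hx⟩ := hc
    rw [PySem.Set.mem_ofList, List.mem_filter] at hexmem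
    obtain ⟨hexpre, -⟩ := hexmem
    rw [Bool.and_eq_true] at hx
    obtain ⟨hin, hne⟩ := hx
    have hne' : c ≠ ex := bne_iff_ne.mp hne
    have hexL0 : ex ∈ L0 := by rw [← hL]; exact List.mem_append_left _ hexpre
    have hinf : (PySem.Str.lower c).toList <:+: (PySem.Str.lower ex).toList :=
      (PySem.Str.isIn_iff_infix _ _).mp hin
    have hle : c.toList.length ≤ ex.toList.length := by
      have h := hinf.length_le
      rw [pv_len_lower, pv_len_lower] at h
      exact h
    have hlt : c.toList.length < ex.toList.length := by
      rcases lt_or_eq_of_le hle with h | h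
      · exact h
      · exfalso
        have heq : (PySem.Str.lower c).toList = (PySem.Str.lower ex).toList :=
          hinf.eq_of_length (by rw [pv_len_lower, pv_len_lower]; exact h)
        exact hne' (hinj c hcL0 ex hexL0 (String.toList_inj.mp heq))
    have hany : L0.any (fun t => (PySem.Str.len c < PySem.Str.len t)
        && PySem.Str.isIn (PySem.Str.lower c) (PySem.Str.lower t)) = true := by
      rw [List.any_eq_true]
      refine ⟨ex, hexL0, ?_⟩
      rw [Bool.and_eq_true, decide_eq_true_eq]
      refine ⟨?_, hin⟩
      rw [PySem.Str.len_eq, PySem.Str.len_eq]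
      exact_mod_cast hlt
    unfold pvKeep
    rw [hany, Bool.not_true]
  have d2 : pvKeep L0 c = false →
      (PySem.Set.ofList (pre.filter (pvKeep L0))).any
        (fun existing_style => PySem.Str.isIn (PySem.Str.lower c) (PySem.Str.lower existing_style)
          && c != existing_style) = true := by
    intro hk
    have hany : L0.any (fun t => (PySem.Str.len c < PySem.Str.len t)
        && PySem.Str.isIn (PySem.Str.lower c) (PySem.Str.lower t)) = true := by
      unfold pvKeep at hk
      rwa [Bool.not_eq_false'] at hk
    rw [List.any_eq_true] at hany
    obtain ⟨t0, ht0, hp0⟩ := hany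
    rw [Bool.and_eq_true, decide_eq_true_eq] at hp0
    have hex : ∃ t ∈ L0, PySem.Str.len c < PySem.Str.len t ∧
        PySem.Str.isIn (PySem.Str.lower c) (PySem.Str.lower t) = true :=
      ⟨t0, ht0, hp0.1, hp0.2⟩
    obtain ⟨t, htL0, ⟨hlt, hin⟩, hmax⟩ :=
      pv_argmax PySem.Str.len
        (fun u => PySem.Str.len c < PySem.Str.len u ∧
          PySem.Str.isIn (PySem.Str.lower c) (PySem.Str.lower u) = true) L0 hex
    have hkeep : pvKeep L0 t = true := by
      unfold pvKeep
      rw [Bool.not_eq_true', List.any_eq_false]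
      intro u hu hptrue
      rw [Bool.and_eq_true, decide_eq_true_eq] at hptrue
      obtain ⟨hltu, hinu⟩ := hptrue
      have hinf1 : (PySem.Str.lower c).toList <:+: (PySem.Str.lower t).toList :=
        (PySem.Str.isIn_iff_infix _ _).mp hin
      have hinf2 : (PySem.Str.lower t).toList <:+: (PySem.Str.lower u).toList :=
        (PySem.Str.isIn_iff_infix _ _).mp hinu
      have hcu : PySem.Str.isIn (PySem.Str.lower c) (PySem.Str.lower u) = true :=
        (PySem.Str.isIn_iff_infix _ _).mpr (hinf1.trans hinf2)
      have := hmax u hu ⟨by omega, hcu⟩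
      omega
    have hne : c ≠ t := by intro h; rw [← h] at hlt; omega
    have htpre : t ∈ pre := by
      rw [← hL] at htL0 hs
      rcases List.mem_append.mp htL0 with h | h
      · exact h
      · exfalso
        rcases List.mem_cons.mp h with rfl | h
        · omega
        · have := (List.pairwise_cons.mp (List.pairwise_append.mp hs).2.1).1 t h
          omega
    rw [List.any_eq_true]
    refine ⟨t, ?_, ?_⟩
    · rw [PySem.Set.mem_ofList, List.mem_filter]; exact ⟨htpre, hkeep⟩
    · rw [Bool.and_eq_true]; exact ⟨hin, bne_iff_ne.mpr hne⟩
  cases hk : pvKeep L0 c with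
  | true =>
    rw [Bool.not_true, Bool.eq_false_iff]
    intro hc
    rw [d1 hc] at hk
    cases hk
  | false =>
    rw [Bool.not_false]
    exact d2 hk

-- A's fold over the sorted list computes (the dedup of) B's filter
theorem pv_fold_eq (L0 : List String)
    (hs : L0.Pairwise (fun a b => PySem.Str.len b ≤ PySem.Str.len a))
    (hinj : ∀ x ∈ L0, ∀ y ∈ L0, PySem.Str.lower x = PySem.Str.lower y → x = y) :
    ∀ (L pre : List String), pre ++ L = L0 →
      L.foldl
        (fun filtered_styles current_style =>
          if !(filtered_styles.any (fun existing_style =>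
                PySem.Str.isIn (PySem.Str.lower current_style) (PySem.Str.lower existing_style)
                  && current_style != existing_style))
          then PySem.Set.add filtered_styles current_style
          else filtered_styles)
        (PySem.Set.ofList (pre.filter (pvKeep L0)))
      = PySem.Set.ofList ((pre ++ L).filter (pvKeep L0)) := by
  intro L
  induction L with
  | nil => intro pre h; rw [List.foldl_nil, List.append_nil]
  | cons c rest ih =>
    intro pre h
    rw [List.foldl_cons, pv_cond L0 pre rest c h hs hinj, Bool.not_not]
    have h' : (pre ++ [c]) ++ rest = L0 := by simpa using h
    have hrest := ih (pre ++ [c]) h'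
    rw [show (pre ++ [c]) ++ rest = pre ++ c :: rest by simp] at hrest
    rw [List.filter_append] at hrest
    cases hk : pvKeep L0 c with
    | true =>
      rw [if_pos rfl]
      rw [List.filter_cons_of_pos hk, List.filter_nil] at hrest
      rw [PySem.Set.ofList_eq_foldl, List.foldl_append] at hrest
      rw [← PySem.Set.ofList_eq_foldl] at hrest
      exact hrest
    | false =>
      rw [if_neg (by simp)]
      rw [List.filter_cons_of_neg (by simp [hk]), List.filter_nil, List.append_nil] at hrest
      exact hrest

-- B's body

-- on a longest-first list the early-exit scan decides "some strictly longer style contains sl"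
theorem pv_contained_eq_any (s sl : String) :
    ∀ (l : List (String × String)),
      l.Pairwise (fun a b => PySem.Str.len b.1 ≤ PySem.Str.len a.1) →
      pv_contained l s sl
        = l.any (fun q => (PySem.Str.len s < PySem.Str.len q.1) && PySem.Str.isIn sl q.2) := by
  intro l
  induction l with
  | nil => intro _; rfl
  | cons a rest ih =>
    intro hp
    obtain ⟨t, tl⟩ := a
    obtain ⟨hhead, hrest⟩ := List.pairwise_cons.mp hp
    simp only [List.any_cons]
    show pv_contained ((t, tl) :: rest) s sl = _
    unfold pv_contained
    by_cases hle : PySem.Str.len t ≤ PySem.Str.len s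
    · rw [if_pos hle]
      have h1 : decide (PySem.Str.len s < PySem.Str.len t) = false := by
        rw [decide_eq_false_iff_not]; omega
      have h2 : rest.any (fun q => (PySem.Str.len s < PySem.Str.len q.1)
          && PySem.Str.isIn sl q.2) = false := by
        rw [List.any_eq_false]
        intro q hq
        have h3 : PySem.Str.len q.1 ≤ PySem.Str.len t := hhead q hq
        simp only [Bool.and_eq_true, decide_eq_true_eq, not_and]
        intro h
        omega
      rw [h1, h2, Bool.false_and, Bool.false_or]
    · rw [if_neg hle]
      have h1 : decide (PySem.Str.len s < PySem.Str.len t) = true := by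
        rw [decide_eq_true_eq]; omega
      rw [h1, Bool.true_and]
      by_cases hin : PySem.Str.isIn sl tl = true
      · rw [if_pos hin, hin, Bool.true_or]
      · rw [if_neg hin, ih hrest, Bool.eq_false_iff.mpr hin, Bool.false_or]

-- B's body is the ofList of the pvKeep-filter of the sorted list
theorem pv_alt_eq (ms : List String) :
    filter_substring_styles_py_alt ms
      = PySem.Set.ofList ((PySem.List.sorted ms PySem.Str.len true).filter
          (pvKeep (PySem.List.sorted ms PySem.Str.len true))) := by
  have hp : ((PySem.List.sorted ms PySem.Str.len true).map (fun s => (s, PySem.Str.lower s))).Pairwise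
      (fun a b => PySem.Str.len b.1 ≤ PySem.Str.len a.1) :=
    (PySem.List.sorted_pairwise_rev ms PySem.Str.len).map _ (fun {a b} h => h)
  have hcont : ∀ p ∈ ((PySem.List.sorted ms PySem.Str.len true).map (fun s => (s, PySem.Str.lower s))),
      (!(pv_contained ((PySem.List.sorted ms PySem.Str.len true).map (fun s => (s, PySem.Str.lower s))) p.1 p.2))
        = (!(((PySem.List.sorted ms PySem.Str.len true).map (fun s => (s, PySem.Str.lower s))).any
            (fun q => (PySem.Str.len p.1 < PySem.Str.len q.1) && PySem.Str.isIn p.2 q.2))) := by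
    intro p _
    rw [pv_contained_eq_any p.1 p.2 _ hp]
  unfold filter_substring_styles_py_alt pvKeep
  simp only [List.filter_congr hcont]
  simp [List.filter_map, List.any_map, Function.comp_def]

-- ===== VERDICT (by name: the statement is the Claim_ definition above) =====
theorem filter_substring_styles_py_spec : Claim_equal_filter_substring_styles_py := by
  intro ms hdom hpre
  show filter_substring_styles_py ms = filter_substring_styles_py_alt ms
  rw [pv_alt_eq]
  unfold filter_substring_styles_py
  by_cases hlen : ms.length ≤ 1
  · rw [if_pos hlen]
    match ms, hlen with
    | [], _ => rfl
    | [x], _ =>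
      have hx : PySem.List.sorted [x] PySem.Str.len true = [x] :=
        PySem.List.sorted_rev_eq_self_of_pairwise _ _ (List.pairwise_singleton _ _)
      rw [hx]
      have hk : pvKeep [x] x = true := by
        unfold pvKeep
        simp
      rw [List.filter_cons_of_pos hk, List.filter_nil]
      rfl
    | x :: y :: t, h => simp at h
  · rw [if_neg hlen]
    have hs := PySem.List.sorted_pairwise_rev ms PySem.Str.len
    have hinj : ∀ x ∈ PySem.List.sorted ms PySem.Str.len true,
        ∀ y ∈ PySem.List.sorted ms PySem.Str.len true,
        PySem.Str.lower x = PySem.Str.lower y → x = y := by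
      intro x hx y hy
      rw [PySem.List.mem_sorted] at hx hy
      exact hpre x hx y hy
    exact pv_fold_eq _ hs hinj _ [] rfl
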